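-- pv_equiv track=rewrite | github.com/ThomasKarpinski/Matura | matura2011_PR_Python_staraformula/zad1_długośćNapisówBinarnych.py | sklej_iter
-- ===== SOURCE A (Python) =====
-- def sklej_iter(n):
--
--     pom = [0 for i in range(n + 1)]
--
--     for i in range(2, n + 1):
--         if i % 2 == 0:
--             pom[i] = i - 1 + 2 * pom[i // 2]
--         else:
--             pom[i] = i - 1 + pom[(i - 1) // 2] + pom[(i + 1) // 2]
--     return pom
-- ===== SOURCE B (Python) =====
-- def sklej_iter(n):
--     cache = {}
--
--     def f(i):
--         v = cache.get(i)
--         if v is not None: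
--             return v
--         if i <= 1:
--             return 0
--         if i % 2 == 0:
--             r = i - 1 + 2 * f(i // 2)
--         else:
--             r = i - 1 + f((i - 1) // 2) + f((i + 1) // 2)
--         cache[i] = r
--         return r
--
--     return [f(i) for i in range(n + 1)]
-- ===== Notes on version B (the rewrite author's own statement) =====
-- stated objective: alternative
-- what changed: Replaces the bottom-up forward sweep that fills pom[2..n] in order with a top-down memoized recursion f(i) (dict cache) driven from each index, materialized by a comprehension over range(n+1).
import Mathlib
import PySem

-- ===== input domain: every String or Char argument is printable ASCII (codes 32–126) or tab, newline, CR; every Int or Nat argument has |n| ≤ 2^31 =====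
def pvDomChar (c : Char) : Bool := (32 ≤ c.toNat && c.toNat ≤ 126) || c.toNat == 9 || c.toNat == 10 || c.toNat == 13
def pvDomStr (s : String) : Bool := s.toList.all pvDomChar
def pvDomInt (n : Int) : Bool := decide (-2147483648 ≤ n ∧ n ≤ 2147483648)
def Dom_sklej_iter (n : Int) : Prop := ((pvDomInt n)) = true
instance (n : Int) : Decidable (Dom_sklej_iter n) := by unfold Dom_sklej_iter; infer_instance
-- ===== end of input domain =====

-- B replaces A's bottom-up forward sweep with a top-down memoized recursion from each index (alternative decomposition, same cost).

-- ===== PORT A =====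
-- pom[i] assignment/read: i is always in [2, n], hence a valid nonnegative index; .set i.toNat / pyGetD are exact there.
def sklej_iter (n : Int) : List Int :=
  let pom : List Int := (PySem.List.pyRange 0 (n + 1) 1).map (fun _ => (0 : Int))
  (PySem.List.pyRange 2 (n + 1) 1).foldl
    (fun pom i =>
      if PySem.Int.mod i 2 = 0 then
        pom.set i.toNat (i - 1 + 2 * PySem.List.pyGetD pom (PySem.Int.floordiv i 2) 0)
      else
        pom.set i.toNat (i - 1 + PySem.List.pyGetD pom (PySem.Int.floordiv (i - 1) 2) 0
          + PySem.List.pyGetD pom (PySem.Int.floordiv (i + 1) 2) 0))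
    pom

-- ===== PORT B =====
-- B's helper f is only ever called on the nonnegative ints of range(n+1) (and its own halved arguments),
-- so it is ported on Nat; '//2' of a nonnegative int is Nat division.
def fmemoAlt (i : Nat) (cache : PySem.Dict Int Int) : Int × PySem.Dict Int Int :=
  match cache.get? (i : Int) with
  | some v => (v, cache)
  | none =>
    if i ≤ 1 then (0, cache)
    else if i % 2 = 0 then
      let p := fmemoAlt (i / 2) cache
      let r := (i : Int) - 1 + 2 * p.1
      (r, p.2.insert (i : Int) r)
    else
      let p1 := fmemoAlt ((i - 1) / 2) cache
      let p2 := fmemoAlt ((i + 1) / 2) p1.2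
      let r := (i : Int) - 1 + p1.1 + p2.1
      (r, p2.2.insert (i : Int) r)
termination_by i
decreasing_by all_goals omega

def sklej_iter_alt (n : Int) : List Int :=
  ((PySem.List.pyRange 0 (n + 1) 1).foldl
    (fun (st : List Int × PySem.Dict Int Int) i =>
      let p := fmemoAlt i.toNat st.2   -- i ∈ range(0, n+1) is nonnegative
      (st.1 ++ [p.1], p.2))
    ([], PySem.Dict.empty)).1

-- ===== PRECONDITION & SPEC =====
def Spec_sklej_iter (n : Int) (out : List Int) : Prop := out = sklej_iter_alt n
instance (n : Int) (out : List Int) : Decidable (Spec_sklej_iter n out) := by unfold Spec_sklej_iter; infer_instance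

-- ===== CLAIM (what is proved, stated in full; the proofs are below) =====
def Claim_equal_sklej_iter : Prop := ∀ (n : Int), Dom_sklej_iter n → Spec_sklej_iter n (sklej_iter n)

-- ===== LEMMAS AND PROOFS =====

-- The common mathematical value both programs compute at index i.
def fPure (i : Nat) : Int :=
  if i ≤ 1 then 0
  else if i % 2 = 0 then (i : Int) - 1 + 2 * fPure (i / 2)
  else (i : Int) - 1 + fPure ((i - 1) / 2) + fPure ((i + 1) / 2)
termination_by i
decreasing_by all_goals omega

def MemoOK (c : PySem.Dict Int Int) : Prop :=
  ∀ (m : Nat) (v : Int), c.get? (m : Int) = some v → v = fPure m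

lemma fmemoAlt_correct : ∀ (i : Nat) (c : PySem.Dict Int Int), MemoOK c →
    (fmemoAlt i c).1 = fPure i ∧ MemoOK (fmemoAlt i c).2 := by
  intro i
  induction i using Nat.strong_induction_on with
  | _ i ih =>
    intro c hc
    rw [fmemoAlt]
    cases hhit : c.get? (i : Int) with
    | some v =>
      exact ⟨hc i v hhit, by simpa [hhit] using hc⟩
    | none =>
      by_cases h1 : i ≤ 1
      · simp only [h1, if_true]
        exact ⟨by rw [fPure]; simp [h1], hc⟩
      · by_cases h2 : i % 2 = 0
        · obtain ⟨hv, hm⟩ := ih (i / 2) (by omega) c hc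
          simp only [h1, h2, if_true, if_false]
          have hr : (i : Int) - 1 + 2 * (fmemoAlt (i / 2) c).1 = fPure i := by
            rw [fPure]; simp [h1, h2, hv]
          refine ⟨hr, ?_⟩
          intro m v hmv
          rcases eq_or_ne (m : Int) (i : Int) with he | hne
          · have hmi : m = i := by exact_mod_cast he
            subst hmi
            rw [PySem.Dict.get?_insert_self] at hmv
            exact (Option.some.inj hmv) ▸ hr
          · rw [PySem.Dict.get?_insert_of_ne _ _ hne] at hmv
            exact hm m v hmv
        · obtain ⟨hv1, hm1⟩ := ih ((i - 1) / 2) (by omega) c hc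
          obtain ⟨hv2, hm2⟩ := ih ((i + 1) / 2) (by omega) _ hm1
          simp only [h1, h2, if_false]
          have hr : (i : Int) - 1 + (fmemoAlt ((i - 1) / 2) c).1
              + (fmemoAlt ((i + 1) / 2) (fmemoAlt ((i - 1) / 2) c).2).1 = fPure i := by
            rw [fPure]; simp [h1, h2, hv1, hv2]
          refine ⟨hr, ?_⟩
          intro m v hmv
          rcases eq_or_ne (m : Int) (i : Int) with he | hne
          · have hmi : m = i := by exact_mod_cast he
            subst hmi
            rw [PySem.Dict.get?_insert_self] at hmv
            exact (Option.some.inj hmv) ▸ hr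
          · rw [PySem.Dict.get?_insert_of_ne _ _ hne] at hmv
            exact hm2 m v hmv

lemma alt_fold (l : List Int) : ∀ (acc : List Int) (c : PySem.Dict Int Int), MemoOK c →
    (l.foldl (fun (st : List Int × PySem.Dict Int Int) i =>
      let p := fmemoAlt i.toNat st.2
      (st.1 ++ [p.1], p.2)) (acc, c)).1 = acc ++ l.map (fun i => fPure i.toNat) := by
  induction l with
  | nil => intro acc c _; simp
  | cons x t iht =>
    intro acc c hc
    obtain ⟨hv, hm⟩ := fmemoAlt_correct x.toNat c hc
    simp only [List.foldl_cons, List.map_cons]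
    rw [iht _ _ hm]
    simp [hv]

lemma alt_eq_map (n : Int) :
    sklej_iter_alt n = (PySem.List.pyRange 0 (n + 1) 1).map (fun i => fPure i.toNat) := by
  unfold sklej_iter_alt
  have := alt_fold (PySem.List.pyRange 0 (n + 1) 1) [] PySem.Dict.empty
    (by intro m v h; simp [PySem.Dict.get?_empty] at h)
  simpa using this

-- A's loop invariant: after processing 2..b, the list holds fPure below b and 0 from b up.
lemma a_fold_inv (n : Int) (hn : 2 ≤ n) : ∀ (k : Nat), (k : Int) ≤ n - 1 →
    ((PySem.List.pyRange 2 (2 + (k : Int)) 1).foldl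
      (fun pom i =>
        if PySem.Int.mod i 2 = 0 then
          pom.set i.toNat (i - 1 + 2 * PySem.List.pyGetD pom (PySem.Int.floordiv i 2) 0)
        else
          pom.set i.toNat (i - 1 + PySem.List.pyGetD pom (PySem.Int.floordiv (i - 1) 2) 0
            + PySem.List.pyGetD pom (PySem.Int.floordiv (i + 1) 2) 0))
      ((PySem.List.pyRange 0 (n + 1) 1).map (fun _ => (0 : Int))))
    = (PySem.List.pyRange 0 (n + 1) 1).map
        (fun i => if i < 2 + (k : Int) then fPure i.toNat else 0) := by
  intro k
  induction k with
  | zero =>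
    intro _
    rw [show (2 + ((0 : Nat) : Int)) = 2 by norm_num,
      PySem.List.pyRange_one_eq_nil (a := 2) (b := 2) (by norm_num)]
    simp only [List.foldl_nil]
    apply List.map_congr_left
    intro i hi
    have hi' := (PySem.List.mem_pyRange_one).1 hi
    by_cases h : i < 2
    · have : i.toNat ≤ 1 := by omega
      rw [fPure]
      simp [h, this]
    · simp [h]
  | succ k ihk =>
    intro hk
    have hk' : (k : Int) ≤ n - 1 := by push_cast at hk ⊢; omega
    rw [show (2 + ((k + 1 : Nat) : Int)) = (2 + (k : Int)) + 1 by push_cast; ring,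
      PySem.List.pyRange_one_succ_right (a := 2) (b := 2 + (k : Int)) (by omega),
      List.foldl_append, ihk hk']
    set b : Int := 2 + (k : Int) with hb
    have hb0 : 0 ≤ b := by omega
    have hbn : b < n + 1 := by omega
    have hb2 : 2 ≤ b := by omega
    have hbt : ((b.toNat : Int)) = b := by omega
    simp only [List.foldl_cons, List.foldl_nil]
    have hget : ∀ (j : Int), 0 ≤ j → j < b →
        PySem.List.pyGetD ((PySem.List.pyRange 0 (n + 1) 1).map
          (fun i => if i < b then fPure i.toNat else 0)) j 0 = fPure j.toNat := by
      intro j hj0 hjb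
      rw [PySem.List.pyGetD_map_pyRange_of_nonneg _ _ _ _ hj0 (by omega)]
      simp [hjb]
    have hset : ∀ (v : Int), v = fPure b.toNat →
        ((PySem.List.pyRange 0 (n + 1) 1).map
          (fun i => if i < b then fPure i.toNat else 0)).set b.toNat v
        = (PySem.List.pyRange 0 (n + 1) 1).map
          (fun i => if i < b + 1 then fPure i.toNat else 0) := by
      intro v hv
      apply List.ext_getElem
      · simp
      · intro j h1 h2
        have hjlen : (j : Int) < n + 1 := by
          have := h2
          simp only [List.length_map, PySem.List.length_pyRange_one] at this
          omega
        rw [List.getElem_set]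
        simp only [List.getElem_map, PySem.List.getElem_pyRange_one]
        by_cases hjb : b.toNat = j
        · rw [if_pos hjb]
          rw [show (0 : Int) + (j : Int) = b by omega]
          rw [if_pos (by omega), hv]
        · rw [if_neg hjb]
          by_cases h : (0 : Int) + (j : Int) < b
          · rw [if_pos h, if_pos (by omega)]
          · rw [if_neg h, if_neg (by omega)]
    by_cases hpar : PySem.Int.mod b 2 = 0
    · rw [if_pos hpar]
      have hfd0 : (0 : Int) ≤ PySem.Int.floordiv b 2 := by
        rw [PySem.Int.floordiv_eq_ediv_of_pos (by norm_num)]; omega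
      have hfdb : PySem.Int.floordiv b 2 < b := by
        rw [PySem.Int.floordiv_eq_ediv_of_pos (by norm_num)]; omega
      rw [hget (PySem.Int.floordiv b 2) hfd0 hfdb]
      apply hset
      have hev : b.toNat % 2 = 0 := by
        rw [PySem.Int.mod_eq_emod_of_pos (by norm_num)] at hpar
        omega
      have hfd : PySem.Int.floordiv b 2 = ((b.toNat / 2 : Nat) : Int) := by
        rw [← hbt]; exact_mod_cast PySem.Int.floordiv_natCast b.toNat 2
      conv_rhs => rw [fPure]
      rw [if_neg (by omega : ¬ b.toNat ≤ 1), if_pos hev, hfd]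
      simp only [Int.toNat_natCast]
      rw [hbt]
    · rw [if_neg hpar]
      have hodd : b.toNat % 2 = 1 := by
        rw [PySem.Int.mod_eq_emod_of_pos (by norm_num)] at hpar
        omega
      have ha0 : (0 : Int) ≤ PySem.Int.floordiv (b - 1) 2 := by
        rw [PySem.Int.floordiv_eq_ediv_of_pos (by norm_num)]; omega
      have hab : PySem.Int.floordiv (b - 1) 2 < b := by
        rw [PySem.Int.floordiv_eq_ediv_of_pos (by norm_num)]; omega
      have hc0 : (0 : Int) ≤ PySem.Int.floordiv (b + 1) 2 := by
        rw [PySem.Int.floordiv_eq_ediv_of_pos (by norm_num)]; omega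
      have hcb : PySem.Int.floordiv (b + 1) 2 < b := by
        rw [PySem.Int.floordiv_eq_ediv_of_pos (by norm_num)]
        omega
      rw [hget (PySem.Int.floordiv (b - 1) 2) ha0 hab,
        hget (PySem.Int.floordiv (b + 1) 2) hc0 hcb]
      apply hset
      have h1' : PySem.Int.floordiv (b - 1) 2 = (((b.toNat - 1) / 2 : Nat) : Int) := by
        rw [show b - 1 = (((b.toNat - 1 : Nat)) : Int) by omega]
        exact_mod_cast PySem.Int.floordiv_natCast (b.toNat - 1) 2
      have h2' : PySem.Int.floordiv (b + 1) 2 = (((b.toNat + 1) / 2 : Nat) : Int) := by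
        rw [show b + 1 = (((b.toNat + 1 : Nat)) : Int) by omega]
        exact_mod_cast PySem.Int.floordiv_natCast (b.toNat + 1) 2
      conv_rhs => rw [fPure]
      rw [if_neg (by omega : ¬ b.toNat ≤ 1), if_neg (by omega : ¬ b.toNat % 2 = 0), h1', h2']
      simp only [Int.toNat_natCast]
      rw [hbt]

-- ===== VERDICT (by name: the statement is the Claim_ definition above) =====
theorem sklej_iter_spec : Claim_equal_sklej_iter := by
  intro n _
  unfold Spec_sklej_iter
  rw [alt_eq_map]
  unfold sklej_iter
  by_cases hn : 2 ≤ n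
  · have := a_fold_inv n hn (n - 1).toNat (by omega)
    rw [show 2 + (((n - 1).toNat : Int)) = n + 1 by omega] at this
    rw [this]
    apply List.map_congr_left
    intro i hi
    have hi' := (PySem.List.mem_pyRange_one).1 hi
    rw [if_pos (by omega)]
  · rw [PySem.List.pyRange_one_eq_nil (a := 2) (b := n + 1) (by omega)]
    simp only [List.foldl_nil]
    apply List.map_congr_left
    intro i hi
    have hi' := (PySem.List.mem_pyRange_one).1 hi
    have : i.toNat ≤ 1 := by omega
    rw [fPure]
    simp [this]
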